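-- pv_equiv track=rewrite | github.com/bpnsingh/practice | scaler/Hashmaps/maximum distance of duplicates.py | solve
-- ===== SOURCE A (Python) =====
-- def solve(A):
--     #create freq_map of element and recent index
--     N  = len(A)
--     ans =0
--     freq_map = dict()
--     for i in range(N):
--         if A[i] not in freq_map:
--             #if fist occurance then update dict with element aganist its index
--             freq_map[A[i]] = i
--         else:
--             #if its duplicate, get the difference of current and last found index
--             temp = i-freq_map[A[i]]
--             ans = max(temp,ans)
--             #don need to update latest index in dict
--     return ans
-- ===== SOURCE B (Python) =====
-- def solve(A):
--     # staged: build first/last index tables by plain overwriting (no branch),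
--     # then a separate max-reduction over the distinct keys
--     last = {x: i for i, x in enumerate(A)}
--     first = {x: i for i, x in reversed(list(enumerate(A)))}
--     ans = 0
--     for x, l in last.items():
--         ans = max(ans, l - first[x])
--     return ans
-- ===== Notes on version B (the rewrite author's own statement) =====
-- stated objective: alternative
-- what changed: B replaces A's single scan with its first-occurrence branch by two branch-free overwrite passes building a last-index table and a first-index table, followed by a separate max-reduction over the distinct keys (last[x]-first[x]).
import Mathlib
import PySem

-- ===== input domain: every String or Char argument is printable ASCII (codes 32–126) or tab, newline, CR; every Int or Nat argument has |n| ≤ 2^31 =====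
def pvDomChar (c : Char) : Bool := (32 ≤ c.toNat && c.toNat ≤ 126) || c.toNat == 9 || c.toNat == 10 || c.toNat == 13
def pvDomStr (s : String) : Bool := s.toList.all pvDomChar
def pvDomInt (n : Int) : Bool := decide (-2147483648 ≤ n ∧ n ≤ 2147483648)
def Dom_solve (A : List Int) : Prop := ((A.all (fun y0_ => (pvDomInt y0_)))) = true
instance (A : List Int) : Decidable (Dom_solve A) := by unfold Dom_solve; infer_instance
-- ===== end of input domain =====

-- B replaces A's conditional first-occurrence scan by two branch-free overwrite passes building
-- first/last index tables plus a separate max-reduction over the distinct keys (alternative, not faster).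

-- ===== PORT A =====
def solve (A : List Int) : Int :=
  let N : Int := (A.length : Int)
  let r := (PySem.List.pyRange 0 N 1).foldl
    (fun (s : Int × PySem.Dict Int Int) i =>
      match s.2.get? (PySem.List.pyGetD A i 0) with
      | none => (s.1, s.2.insert (PySem.List.pyGetD A i 0) i)
      | some j => (max (i - j) s.1, s.2))
    ((0 : Int), PySem.Dict.empty)
  r.1

-- ===== PORT B =====
-- last = {x: i for i, x in enumerate(A)}
def buildLast (A : List Int) : PySem.Dict Int Int :=
  (PySem.List.enumerate A 0).foldl (fun d p => d.insert p.2 p.1) PySem.Dict.empty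

-- first = {x: i for i, x in reversed(list(enumerate(A)))}
def buildFirst (A : List Int) : PySem.Dict Int Int :=
  (PySem.List.enumerate A 0).reverse.foldl (fun d p => d.insert p.2 p.1) PySem.Dict.empty

def solve_alt (A : List Int) : Int :=
  -- first[x]: KeyError impossible (both dicts carry exactly the elements of A as keys), so getD 0 is exact
  (buildLast A).items.foldl (fun ans p => max ans (p.2 - ((buildFirst A).get? p.1).getD 0)) 0

-- ===== PRECONDITION & SPEC =====
def Spec_solve (A : List Int) (out : Int) : Prop := out = solve_alt A
instance (A : List Int) (out : Int) : Decidable (Spec_solve A out) := by unfold Spec_solve; infer_instance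

-- ===== CLAIM (what is proved, stated in full; the proofs are below) =====
def Claim_equal_solve : Prop := ∀ (A : List Int), Dom_solve A → Spec_solve A (solve A)

-- ===== LEMMAS AND PROOFS =====

-- A's loop, with the dict invariant "freq_map maps x to the index of its first occurrence".
lemma solve_main (full : List Int) :
    ∀ (suf pre : List Int) (ans : Int) (d : PySem.Dict Int Int),
    full = pre ++ suf →
    (∀ x : Int, d.get? x = (PySem.List.index? pre x).map (fun n => (n : Int))) →
    0 ≤ ans →
    ((PySem.List.enumerate suf (pre.length : Int)).foldl
       (fun (s : Int × PySem.Dict Int Int) p =>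
         match s.2.get? p.2 with
         | none => (s.1, s.2.insert p.2 p.1)
         | some j => (max (p.1 - j) s.1, s.2)) (ans, d)).1
    = (PySem.List.enumerate suf (pre.length : Int)).foldl
       (fun m p => max m (p.1 - (((PySem.List.index? full p.2).getD 0 : Nat) : Int))) ans := by
  intro suf
  induction suf with
  | nil => intro pre ans d _ _ _; simp [PySem.List.enumerate_nil]
  | cons x rest ih =>
    intro pre ans d hfull hd hans
    rw [PySem.List.enumerate_cons, List.foldl_cons, List.foldl_cons]
    have hx := hd x
    have hstart : (pre.length : Int) + 1 = (((pre ++ [x]).length : Nat) : Int) := by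
      simp
    cases hix : PySem.List.index? pre x with
    | none =>
      have hxd : d.get? x = none := by rw [hx, hix]; rfl
      have hxnot : x ∉ pre := (PySem.List.index?_eq_none_iff pre x).1 hix
      have hidx : PySem.List.index? full x = some pre.length := by
        rw [show full = (pre ++ [x]) ++ rest by simpa using hfull,
            PySem.List.index?_append_of_mem rest (by simp),
            PySem.List.index?_append_singleton_self pre x hxnot]
      have ih' := ih (pre ++ [x]) ans (d.insert x (pre.length : Int))
        (by simpa using hfull)
        (fun y => by
          by_cases hy : y = x
          · subst hy
            rw [PySem.Dict.get?_insert_self,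
                PySem.List.index?_append_singleton_self pre y hxnot]
            rfl
          · rw [PySem.Dict.get?_insert_of_ne _ _ hy, hd y]
            by_cases hmem : y ∈ pre
            · rw [PySem.List.index?_append_of_mem [x] hmem]
            · rw [(PySem.List.index?_eq_none_iff pre y).2 hmem,
                  (PySem.List.index?_eq_none_iff _ y).2 (by simp [hmem, hy])])
        hans
      simp only [hxd, hidx] at *
      rw [← hstart] at ih'
      simpa [max_eq_left hans] using ih'
    | some n =>
      have hxd : d.get? x = some (n : Int) := by rw [hx, hix]; rfl
      have hmem : x ∈ pre := by
        have := (PySem.List.index?_isSome_iff pre x)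
        rw [hix] at this; exact this.1 rfl
      have hidx : PySem.List.index? full x = some n := by
        rw [hfull, PySem.List.index?_append_of_mem (x :: rest) hmem, hix]
      have ih' := ih (pre ++ [x]) (max ((pre.length : Int) - (n : Int)) ans) d
        (by simpa using hfull)
        (fun y => by
          rw [hd y]
          by_cases hmem' : y ∈ pre
          · rw [PySem.List.index?_append_of_mem [x] hmem']
          · have hyx : y ≠ x := fun h => hmem' (h ▸ hmem)
            rw [(PySem.List.index?_eq_none_iff pre y).2 hmem',
                (PySem.List.index?_eq_none_iff _ y).2 (by simp [hmem', hyx])])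
        (le_trans hans (le_max_right _ _))
      simp only [hxd, hidx] at *
      rw [← hstart] at ih'
      simp only [Option.getD_some]
      rw [max_comm ans]
      exact ih'

-- solve as a fold of "index minus first-occurrence index" over the enumeration
lemma solve_eq_idx (A : List Int) :
    solve A = (PySem.List.enumerate A 0).foldl
      (fun m p => max m (p.1 - (((PySem.List.index? A p.2).getD 0 : Nat) : Int))) 0 := by
  have hmain := solve_main A A [] 0 PySem.Dict.empty (by simp)
    (fun x => by simp [pysem]) le_rfl
  simp only [List.length_nil, Nat.cast_zero] at hmain
  unfold solve
  rw [PySem.List.enumerate_eq_map_pyRange A 0] at hmain ⊢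
  simp only [List.foldl_map, PySem.List.len] at hmain ⊢
  exact hmain

-- first-index table: get? is the first-occurrence index (shifted by the enumeration start)
lemma buildFirst_get? (A : List Int) : ∀ (s : Int) (x : Int),
    ((PySem.List.enumerate A s).reverse.foldl (fun d p => d.insert p.2 p.1)
      (PySem.Dict.empty : PySem.Dict Int Int)).get? x
    = (PySem.List.index? A x).map (fun n => s + (n : Int)) := by
  induction A with
  | nil => intro s x; simp [PySem.List.enumerate_nil, pysem]
  | cons a A ih =>
    intro s x
    rw [PySem.List.enumerate_cons, List.reverse_cons, List.foldl_append]
    simp only [List.foldl_cons, List.foldl_nil]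
    by_cases hx : x = a
    · subst hx
      rw [PySem.Dict.get?_insert_self, PySem.List.index?_cons_self]
      simp
    · rw [PySem.Dict.get?_insert_of_ne _ _ hx, ih (s + 1) x,
          PySem.List.index?_cons_of_ne A (fun h => hx h.symm)]
      cases PySem.List.index? A x
      · simp
      · simp; ring

-- last-index table: appending an element overwrites its key with the new index
lemma buildLast_append (A : List Int) (y : Int) :
    buildLast (A ++ [y]) = (buildLast A).insert y (A.length : Int) := by
  unfold buildLast
  rw [PySem.List.enumerate_append, List.foldl_append]
  simp [PySem.List.enumerate_cons, PySem.List.enumerate_nil]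

-- spec of the last-index table on members: it holds the LAST occurrence index
lemma buildLast_spec (A : List Int) : ∀ x ∈ A, ∃ k : Nat,
    A[k]? = some x ∧ (buildLast A).get? x = some (k : Int) ∧
    ∀ j : Nat, A[j]? = some x → j ≤ k := by
  induction A using List.reverseRecOn with
  | nil => intro x hx; simp at hx
  | append_singleton A y ih =>
    intro x hx
    rw [buildLast_append]
    by_cases hxy : x = y
    · subst hxy
      refine ⟨A.length, by simp, by rw [PySem.Dict.get?_insert_self], ?_⟩
      intro j hj
      have := (List.getElem?_eq_some_iff.1 hj).1
      simp at this; omega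
    · have hxA : x ∈ A := by
        rcases List.mem_append.1 hx with h | h
        · exact h
        · simp at h; exact absurd h hxy
      obtain ⟨k, hk1, hk2, hk3⟩ := ih x hxA
      refine ⟨k, ?_, ?_, ?_⟩
      · rw [List.getElem?_append_left (by exact (List.getElem?_eq_some_iff.1 hk1).1)]
        exact hk1
      · rw [PySem.Dict.get?_insert_of_ne _ _ hxy]; exact hk2
      · intro j hj
        have hjlt := (List.getElem?_eq_some_iff.1 hj).1
        simp at hjlt
        by_cases hjA : j < A.length
        · exact hk3 j (by rw [List.getElem?_append_left hjA] at hj; exact hj)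
        · exfalso
          have hje : j = A.length := by omega
          subst hje
          rw [List.getElem?_append_right le_rfl] at hj
          simp at hj
          exact hxy hj.symm

-- keys of the last-index table: the distinct elements of A, with no duplicates
lemma buildLast_keys (A : List Int) :
    (buildLast A).keys = PySem.Set.ofList A ∧ (buildLast A).keys.Nodup := by
  constructor
  · unfold buildLast
    rw [PySem.Dict.keys_foldl_insert_key]
    simp [PySem.List.map_snd_enumerate, PySem.Set.update_nil_left, PySem.Dict.keys_empty]
  · exact PySem.Dict.nodup_keys_foldl_insert_key _ _ _ _ (by simp [PySem.Dict.keys_empty])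

-- generic: two max-folds from 0 agree when each side's values are dominated by the other's
lemma foldl_max_le {α : Type} (f : α → Int) (c : Int) :
    ∀ (L : List α) (i : Int), (∀ a ∈ L, f a ≤ c) → i ≤ c →
    L.foldl (fun m a => max m (f a)) i ≤ c := by
  intro L
  induction L with
  | nil => intro i _ h; simpa using h
  | cons a L ih =>
    intro i hb hi
    rw [List.foldl_cons]
    exact ih _ (fun x hx => hb x (List.mem_cons_of_mem _ hx))
      (max_le hi (hb a List.mem_cons_self))

lemma le_foldl_max' {α : Type} (f : α → Int) :
    ∀ (L : List α) (i : Int), (i ≤ L.foldl (fun m a => max m (f a)) i) ∧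
    ∀ a ∈ L, f a ≤ L.foldl (fun m a => max m (f a)) i := by
  intro L
  induction L with
  | nil => intro i; simp
  | cons a L ih =>
    intro i
    rw [List.foldl_cons]
    refine ⟨le_trans (le_max_left _ _) (ih _).1, ?_⟩
    intro x hx
    rcases List.mem_cons.1 hx with h | h
    · subst h; exact le_trans (le_max_right _ _) (ih _).1
    · exact (ih _).2 x h

lemma foldl_max_congr {α β : Type} (L1 : List α) (L2 : List β) (f : α → Int) (g : β → Int)
    (h1 : ∀ a ∈ L1, ∃ b ∈ L2, f a ≤ g b) (h2 : ∀ b ∈ L2, ∃ a ∈ L1, g b ≤ f a) :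
    L1.foldl (fun m a => max m (f a)) 0 = L2.foldl (fun m b => max m (g b)) 0 := by
  apply le_antisymm
  · apply foldl_max_le _ _ _ _ _ (le_foldl_max' g L2 0).1
    intro a ha
    obtain ⟨b, hb, hab⟩ := h1 a ha
    exact le_trans hab ((le_foldl_max' g L2 0).2 b hb)
  · apply foldl_max_le _ _ _ _ _ (le_foldl_max' f L1 0).1
    intro b hb
    obtain ⟨a, ha, hba⟩ := h2 b hb
    exact le_trans hba ((le_foldl_max' f L1 0).2 a ha)

theorem solve_eq_alt (A : List Int) : solve A = solve_alt A := by
  have hfst : ∀ x, (((buildFirst A).get? x).getD 0) =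
      (((PySem.List.index? A x).getD 0 : Nat) : Int) := by
    intro x
    unfold buildFirst
    rw [buildFirst_get? A 0 x]
    cases PySem.List.index? A x <;> simp
  obtain ⟨hkeys, hnd⟩ := buildLast_keys A
  have hitems := PySem.Dict.items_eq_map_keys (buildLast A) hnd (0 : Int)
  unfold solve_alt
  rw [solve_eq_idx, hitems, hkeys, List.foldl_map]
  apply foldl_max_congr
  · -- every i - first(A[i]) is dominated by last(A[i]) - first(A[i])
    intro p hp
    obtain ⟨k, hk, hpk⟩ := (PySem.List.mem_enumerate_iff _ _ _).1 hp
    obtain ⟨k0, hk01, hk02, hk03⟩ := buildLast_spec A (A[k]) (A.getElem_mem hk)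
    refine ⟨A[k], (PySem.Set.mem_ofList _ _).2 (A.getElem_mem hk), ?_⟩
    have hgd : (buildLast A).getD (A[k]) 0 = (k0 : Int) := by
      rw [PySem.Dict.getD_eq_get?_getD, hk02]; rfl
    have hkk0 : k ≤ k0 := hk03 k (by simp [hk])
    rw [hpk, hgd, hfst]
    simp only
    have : (k:Int) ≤ (k0:Int) := by exact_mod_cast hkk0
    omega
  · -- every last(x) - first(x) is attained at index last(x)
    intro x hxmem
    have hxA : x ∈ A := (PySem.Set.mem_ofList _ _).1 hxmem
    obtain ⟨k, hk1, hk2, _⟩ := buildLast_spec A x hxA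
    have hklt := (List.getElem?_eq_some_iff.1 hk1).1
    have hAk : A[k] = x := (List.getElem?_eq_some_iff.1 hk1).2
    refine ⟨((k : Int), x), (PySem.List.mem_enumerate_iff _ _ _).2 ⟨k, hklt, by simp [hAk]⟩, ?_⟩
    have hgd : (buildLast A).getD x 0 = (k : Int) := by
      rw [PySem.Dict.getD_eq_get?_getD, hk2]; rfl
    rw [hgd, hfst]

-- ===== VERDICT (by name: the statement is the Claim_ definition above) =====
theorem solve_spec : Claim_equal_solve := by
  intro A _
  exact solve_eq_alt A
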